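-- pv_equiv track=rewrite | github.com/acyclics/Raw-Python-Chess-Engine | utils.py | generate_diagonal_indexes
-- ===== SOURCE A (Python) =====
-- def generate_diagonal_indexes(starting_i, starting_j):
--     df = min(7 - starting_i, 7 - starting_j)
--     indexes1 = [(starting_i + i, starting_j + i) for i in range(1, df + 1)]
--
--     df = min(starting_i, starting_j)
--     indexes2 = [(starting_i - i, starting_j - i) for i in range(1, df + 1)]
--
--     df = min(7 - starting_i, starting_j)
--     indexes3 = [(starting_i + i, starting_j - i) for i in range(1, df + 1)]
--
--     df = min(starting_i, 7 - starting_j)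
--     indexes4 = [(starting_i - i, starting_j + i) for i in range(1, df + 1)]
--
--     return indexes1, indexes2, indexes3, indexes4
-- ===== SOURCE B (Python) =====
-- def _ray(i, j, di, dj):
--     # walk outward one step at a time; test only the edge each axis approaches
--     ray = []
--     while (i + di <= 7 if di == 1 else 0 <= i + di) and (j + dj <= 7 if dj == 1 else 0 <= j + dj):
--         i += di
--         j += dj
--         ray.append((i, j))
--     return ray
--
--
-- def generate_diagonal_indexes(starting_i, starting_j):
--     return (_ray(starting_i, starting_j, 1, 1),
--             _ray(starting_i, starting_j, -1, -1),
--             _ray(starting_i, starting_j, 1, -1),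
--             _ray(starting_i, starting_j, -1, 1))
-- ===== Notes on version B (the rewrite author's own statement) =====
-- stated objective: alternative
-- what changed: Replaces A's four min-bounded range comprehensions with a single step-and-test walk helper that moves outward one square at a time per diagonal direction, appending while the approached edge stays on the board.
import Mathlib
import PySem

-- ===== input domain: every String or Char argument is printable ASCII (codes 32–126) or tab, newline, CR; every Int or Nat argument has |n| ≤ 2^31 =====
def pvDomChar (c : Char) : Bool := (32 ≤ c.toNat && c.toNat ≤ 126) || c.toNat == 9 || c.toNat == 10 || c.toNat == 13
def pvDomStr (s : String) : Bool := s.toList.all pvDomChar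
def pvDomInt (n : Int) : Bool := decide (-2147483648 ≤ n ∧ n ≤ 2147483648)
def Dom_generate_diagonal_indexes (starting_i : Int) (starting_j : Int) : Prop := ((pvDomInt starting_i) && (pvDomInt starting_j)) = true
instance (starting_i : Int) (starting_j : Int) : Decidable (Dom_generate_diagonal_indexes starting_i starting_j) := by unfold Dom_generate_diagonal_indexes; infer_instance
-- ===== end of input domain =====

-- B walks each diagonal outward step by step testing only the approached edge, instead of A's four precomputed min-based range comprehensions; objective: alternative decomposition, same cost.

-- ===== PORT A =====
def generate_diagonal_indexes (starting_i : Int) (starting_j : Int) : (List (Int × Int)) × (List (Int × Int)) × (List (Int × Int)) × (List (Int × Int)) :=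
  let df1 := min (7 - starting_i) (7 - starting_j)
  let indexes1 := (PySem.List.pyRange 1 (df1 + 1) 1).map (fun i => (starting_i + i, starting_j + i))
  let df2 := min starting_i starting_j
  let indexes2 := (PySem.List.pyRange 1 (df2 + 1) 1).map (fun i => (starting_i - i, starting_j - i))
  let df3 := min (7 - starting_i) starting_j
  let indexes3 := (PySem.List.pyRange 1 (df3 + 1) 1).map (fun i => (starting_i + i, starting_j - i))
  let df4 := min starting_i (7 - starting_j)
  let indexes4 := (PySem.List.pyRange 1 (df4 + 1) 1).map (fun i => (starting_i - i, starting_j + i))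
  (indexes1, indexes2, indexes3, indexes4)

-- ===== PORT B =====
-- port of Source B's _ray while loop; the 'di = 1 ∨ di = -1' conjuncts are totality guards only
-- (Source B calls _ray with di, dj ∈ {1, -1}; the guard makes the recursion well-founded in Lean).
def pvRay (i j di dj : Int) : List (Int × Int) :=
  if h : (di = 1 ∨ di = -1) ∧ (dj = 1 ∨ dj = -1) ∧
      (if di = 1 then i + di ≤ 7 else 0 ≤ i + di) ∧ (if dj = 1 then j + dj ≤ 7 else 0 ≤ j + dj) then
    (i + di, j + dj) :: pvRay (i + di) (j + dj) di dj
  else []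
termination_by ((if di = 1 then 7 - i else i) + (if dj = 1 then 7 - j else j)).toNat
decreasing_by
  obtain ⟨hdi, hdj, hi, hj⟩ := h
  rcases hdi with h1 | h1 <;> rcases hdj with h2 | h2 <;> simp [h1, h2] at hi hj ⊢ <;> omega

def generate_diagonal_indexes_alt (starting_i : Int) (starting_j : Int) : (List (Int × Int)) × (List (Int × Int)) × (List (Int × Int)) × (List (Int × Int)) :=
  (pvRay starting_i starting_j 1 1,
   pvRay starting_i starting_j (-1) (-1),
   pvRay starting_i starting_j 1 (-1),
   pvRay starting_i starting_j (-1) 1)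

-- ===== PRECONDITION & SPEC =====
def Spec_generate_diagonal_indexes (starting_i : Int) (starting_j : Int) (out : (List (Int × Int)) × (List (Int × Int)) × (List (Int × Int)) × (List (Int × Int))) : Prop := out = generate_diagonal_indexes_alt starting_i starting_j
instance (starting_i : Int) (starting_j : Int) (out : (List (Int × Int)) × (List (Int × Int)) × (List (Int × Int)) × (List (Int × Int))) : Decidable (Spec_generate_diagonal_indexes starting_i starting_j out) := by unfold Spec_generate_diagonal_indexes; infer_instance

-- ===== CLAIM (what is proved, stated in full; the proofs are below) =====
def Claim_equal_generate_diagonal_indexes : Prop := ∀ (starting_i : Int) (starting_j : Int), Dom_generate_diagonal_indexes starting_i starting_j → Spec_generate_diagonal_indexes starting_i starting_j (generate_diagonal_indexes starting_i starting_j)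

-- ===== LEMMAS AND PROOFS =====

lemma pyRange_shift (a b c : Int) :
    PySem.List.pyRange (a + c) (b + c) 1 = (PySem.List.pyRange a b 1).map (· + c) := by
  simp only [PySem.List.pyRange_one, List.map_map]
  have hb : b + c - (a + c) = b - a := by ring
  rw [hb]
  exact List.map_congr_left (fun k _ => by dsimp; ring)

/-- the step-and-test walk equals A's min-bounded comprehension, for unit directions on each axis -/
lemma pvRay_eq (di dj : Int) (hdi : di = 1 ∨ di = -1) (hdj : dj = 1 ∨ dj = -1) :
    ∀ (n : Nat) (i j : Int),
      (min (if di = 1 then 7 - i else i) (if dj = 1 then 7 - j else j)).toNat = n →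
      pvRay i j di dj =
        (PySem.List.pyRange 1 (min (if di = 1 then 7 - i else i) (if dj = 1 then 7 - j else j) + 1) 1).map
          (fun t => (i + di * t, j + dj * t)) := by
  intro n
  induction n with
  | zero =>
    intro i j hn
    rw [pvRay, dif_neg, PySem.List.pyRange_one_eq_nil (by omega), List.map_nil]
    rintro ⟨-, -, hi, hj⟩
    rcases hdi with h1 | h1 <;> rcases hdj with h2 | h2 <;>
      simp [h1, h2] at hi hj hn <;> omega
  | succ n ih =>
    intro i j hn
    have hmin : 1 ≤ min (if di = 1 then 7 - i else i) (if dj = 1 then 7 - j else j) := by omega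
    have hguard : (di = 1 ∨ di = -1) ∧ (dj = 1 ∨ dj = -1) ∧
        (if di = 1 then i + di ≤ 7 else 0 ≤ i + di) ∧ (if dj = 1 then j + dj ≤ 7 else 0 ≤ j + dj) := by
      refine ⟨hdi, hdj, ?_, ?_⟩ <;>
        rcases hdi with h1 | h1 <;> rcases hdj with h2 | h2 <;> simp [h1, h2] at hmin ⊢ <;> omega
    have hmin' : (min (if di = 1 then 7 - (i + di) else i + di)
        (if dj = 1 then 7 - (j + dj) else j + dj)) =
        min (if di = 1 then 7 - i else i) (if dj = 1 then 7 - j else j) - 1 := by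
      rcases hdi with h1 | h1 <;> rcases hdj with h2 | h2 <;> simp [h1, h2] <;> omega
    rw [pvRay, dif_pos hguard, ih (i + di) (j + dj) (by omega), hmin',
        PySem.List.pyRange_one_cons (by omega :
          (1 : Int) < min (if di = 1 then 7 - i else i) (if dj = 1 then 7 - j else j) + 1),
        List.map_cons]
    have hsh : PySem.List.pyRange (1 + 1)
        (min (if di = 1 then 7 - i else i) (if dj = 1 then 7 - j else j) + 1) 1 =
        (PySem.List.pyRange 1
          (min (if di = 1 then 7 - i else i) (if dj = 1 then 7 - j else j)) 1).map (· + 1) := by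
      have := pyRange_shift 1 (min (if di = 1 then 7 - i else i) (if dj = 1 then 7 - j else j)) 1
      simpa using this
    rw [hsh, List.map_map]
    refine List.cons_eq_cons.mpr ⟨by simp [mul_one], ?_⟩
    have hmm : min (if di = 1 then 7 - i else i) (if dj = 1 then 7 - j else j) - 1 + 1 =
        min (if di = 1 then 7 - i else i) (if dj = 1 then 7 - j else j) := by ring
    rw [hmm]
    exact List.map_congr_left (fun t _ => by
      simp only [Function.comp_apply, Prod.mk.injEq]
      exact ⟨by ring, by ring⟩)

-- ===== VERDICT (by name: the statement is the Claim_ definition above) =====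
theorem generate_diagonal_indexes_spec : Claim_equal_generate_diagonal_indexes := by
  intro si sj _
  unfold Spec_generate_diagonal_indexes generate_diagonal_indexes generate_diagonal_indexes_alt
  refine Prod.ext ?_ (Prod.ext ?_ (Prod.ext ?_ ?_))
  · rw [pvRay_eq 1 1 (Or.inl rfl) (Or.inl rfl) _ si sj rfl]
    norm_num
  · rw [pvRay_eq (-1) (-1) (Or.inr rfl) (Or.inr rfl) _ si sj rfl]
    norm_num [sub_eq_add_neg]
  · rw [pvRay_eq 1 (-1) (Or.inl rfl) (Or.inr rfl) _ si sj rfl]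
    norm_num [sub_eq_add_neg]
  · rw [pvRay_eq (-1) 1 (Or.inr rfl) (Or.inl rfl) _ si sj rfl]
    norm_num [sub_eq_add_neg]
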